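-- pv_equiv track=rewrite | github.com/keepitblazing/Algorithm | LV0/조건에 맞게 수열 변환하기 2.py | solution
-- ===== SOURCE A (Python) =====
-- def solution(arr):
--     x = 0
--     while True:
--         transformedArr = list(map(lambda num: num // 2 if num >= 50 and num % 2 == 0 else num * 2 + 1 if num < 50 and num % 2 == 1 else num, arr))
--         if arr == transformedArr:
--             return x
--         arr = transformedArr
--         x += 1
-- ===== SOURCE B (Python) =====
-- def solution(arr):
--     best = 0
--     for num in arr:
--         c = 0
--         while True:
--             t = num // 2 if num >= 50 and num % 2 == 0 else num * 2 + 1 if num < 50 and num % 2 == 1 else num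
--             if t == num:
--                 break
--             num = t
--             c += 1
--         best = max(best, c)
--     return best
-- ===== Notes on version B (the rewrite author's own statement) =====
-- stated objective: alternative
-- what changed: Replaces A's synchronized whole-array rounds (rebuild and compare the full list each iteration) with independent per-element convergence loops, returning the maximum per-element step count.
import Mathlib
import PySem

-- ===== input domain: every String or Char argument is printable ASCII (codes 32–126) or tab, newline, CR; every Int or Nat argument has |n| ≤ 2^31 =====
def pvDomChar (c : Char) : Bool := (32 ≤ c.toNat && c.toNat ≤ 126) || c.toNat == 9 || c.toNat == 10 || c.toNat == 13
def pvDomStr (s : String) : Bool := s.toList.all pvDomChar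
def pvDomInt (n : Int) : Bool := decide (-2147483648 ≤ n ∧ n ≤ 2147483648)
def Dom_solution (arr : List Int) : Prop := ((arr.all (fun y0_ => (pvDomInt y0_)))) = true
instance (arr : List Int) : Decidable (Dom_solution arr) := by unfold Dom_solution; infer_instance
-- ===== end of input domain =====

-- B replaces A's synchronized whole-array rounds by independent per-element convergence
-- loops, returning the maximum per-element step count (return value only; neither mutates arr).

-- the elementwise transform shared by both Pythons (Python // and % via PySem)
def pvStep (num : Int) : Int :=
  if 50 ≤ num ∧ PySem.Int.mod num 2 = 0 then PySem.Int.floordiv num 2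
  else if num < 50 ∧ PySem.Int.mod num 2 = 1 then num * 2 + 1
  else num

-- ===== PORT A =====
-- A's `while True` loop, fuel-bounded: fuel 100 is proved sufficient under Pre_solution
-- (on Dom every admitted element reaches its fixed point in at most 99 rounds).
def pvLoopA : Nat → List Int → Int → Int
  | 0, _, x => x
  | f + 1, arr, x =>
    let transformedArr := arr.map pvStep
    if arr = transformedArr then x else pvLoopA f transformedArr (x + 1)

def solution (arr : List Int) : Int := pvLoopA 100 arr 0

-- ===== PORT B =====
-- B's inner `while True` per-element loop, fuel-bounded likewise.
def pvCnt : Nat → Int → Int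
  | 0, _ => 0
  | f + 1, num => let t := pvStep num; if t = num then 0 else 1 + pvCnt f t

def solution_alt (arr : List Int) : Int :=
  arr.foldl (fun best num => max best (pvCnt 100 num)) 0

-- ===== PRECONDITION & SPEC =====
-- Pre_ excludes arrays containing an odd element below -1: on those A (and B) loop forever
-- (the value 2*n+1 stays odd and below -1), so A never returns there.
def Pre_solution (arr : List Int) : Prop := ∀ n ∈ arr, ¬(n % 2 = 1 ∧ n < -1)
instance (arr : List Int) : Decidable (Pre_solution arr) := by unfold Pre_solution; infer_instance
def pvWitness_solution : List Int := [100, 3, -1, -2, 51]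

def Spec_solution (arr : List Int) (out : Int) : Prop := out = solution_alt arr
instance (arr : List Int) (out : Int) : Decidable (Spec_solution arr out) := by unfold Spec_solution; infer_instance

-- ===== CLAIM (what is proved, stated in full; the proofs are below) =====
def Claim_equal_solution : Prop := ∀ (arr : List Int), Dom_solution arr → Pre_solution arr → Spec_solution arr (solution arr)

-- ===== LEMMAS AND PROOFS =====

/-- `n` has reached its fixed point after `f` applications of `pvStep`. -/
def pvHalts (f : Nat) (n : Int) : Prop := pvStep (pvStep^[f] n) = pvStep^[f] n

theorem pvHalts_of_fixed {n : Int} (h : pvStep n = n) (f : Nat) : pvHalts f n := by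
  unfold pvHalts; rw [Function.iterate_fixed h]; exact h

theorem pvHalts_succ {f : Nat} {n : Int} (h : pvHalts f n) : pvHalts (f + 1) n := by
  unfold pvHalts at *
  rw [Function.iterate_succ_apply', h, h]

theorem pvHalts_mono {f g : Nat} {n : Int} (hfg : f ≤ g) (h : pvHalts f n) : pvHalts g n := by
  induction g with
  | zero => have : f = 0 := by omega
            subst this; exact h
  | succ g ih =>
    by_cases hf : f = g + 1
    · subst hf; exact h
    · exact pvHalts_succ (ih (by omega))

theorem pvHalts_step {f : Nat} {n : Int} : pvHalts f (pvStep n) ↔ pvHalts (f + 1) n := by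
  unfold pvHalts; rw [Function.iterate_succ_apply]

-- odd n in [25,49] (indeed any odd n ≥ 25) is fixed after one step
theorem pvFix_big_odd {p : Int} (h50 : 50 ≤ p) (hodd : p % 2 = 1) : pvStep p = p := by
  unfold pvStep
  rw [PySem.Int.mod_eq_emod_of_pos (by omega)]
  simp only [hodd]
  norm_num
  omega

theorem pvStep_odd_small {m : Int} (h : m < 50) (hodd : m % 2 = 1) : pvStep m = m * 2 + 1 := by
  unfold pvStep
  rw [PySem.Int.mod_eq_emod_of_pos (by omega)]
  have : ¬(50 ≤ m ∧ m % 2 = 0) := by omega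
  rw [if_neg this, if_pos ⟨h, hodd⟩]

theorem pvStep_even_small {m : Int} (h : m < 50) (heven : m % 2 = 0) : pvStep m = m := by
  unfold pvStep
  rw [PySem.Int.mod_eq_emod_of_pos (by omega)]
  have h1 : ¬(50 ≤ m ∧ m % 2 = 0) := by omega
  have h2 : ¬(m < 50 ∧ m % 2 = 1) := by omega
  rw [if_neg h1, if_neg h2]

theorem pvStep_even_big {n : Int} (h : 50 ≤ n) (heven : n % 2 = 0) :
    pvStep n = PySem.Int.floordiv n 2 := by
  unfold pvStep
  rw [PySem.Int.mod_eq_emod_of_pos (by omega)]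
  rw [if_pos ⟨h, heven⟩]

theorem pvHalts_odd_ge25 {m : Int} (h : 25 ≤ m) (hodd : m % 2 = 1) : pvHalts 1 m := by
  by_cases h50 : 50 ≤ m
  · exact pvHalts_of_fixed (pvFix_big_odd h50 hodd) 1
  · unfold pvHalts
    rw [Function.iterate_one, pvStep_odd_small (by omega) hodd]
    exact pvFix_big_odd (by omega) (by omega)

-- even n ≥ 50 below 2^(f+6) halts within f+6 steps
theorem pvHalts_even_big : ∀ (f : Nat) (n : Int), 50 ≤ n → n < 2 ^ (f + 6) → pvHalts (f + 6) n := by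
  intro f
  induction f with
  | zero =>
    intro n h50 hlt
    norm_num at hlt
    interval_cases n <;> (unfold pvHalts; decide)
  | succ f ih =>
    intro n h50 hlt
    by_cases hodd : n % 2 = 1
    · exact pvHalts_of_fixed (pvFix_big_odd h50 hodd) _
    · have heven : n % 2 = 0 := by omega
      have hstep : pvStep n = PySem.Int.floordiv n 2 := pvStep_even_big h50 heven
      have hm : PySem.Int.floordiv n 2 = n / 2 := PySem.Int.floordiv_eq_ediv_of_pos (by omega)
      set m := PySem.Int.floordiv n 2 with hmdef
      have hpow : (2 : Int) ^ (f + 1 + 6) = 2 * 2 ^ (f + 6) := by ring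
      have hm25 : 25 ≤ m := by omega
      have hmlt : m < 2 ^ (f + 6) := by omega
      have hhm : pvHalts (f + 6) m := by
        by_cases hm50 : 50 ≤ m
        · exact ih m hm50 hmlt
        · by_cases hmo : m % 2 = 1
          · exact pvHalts_mono (by omega) (pvHalts_odd_ge25 hm25 hmo)
          · exact pvHalts_of_fixed (pvStep_even_small (by omega) (by omega)) _
      have : pvHalts (f + 6) (pvStep n) := by rw [hstep]; exact hhm
      exact pvHalts_step.mp this

theorem pvHalts_odd_small {n : Int} (h1 : 1 ≤ n) (h2 : n < 50) (hodd : n % 2 = 1) :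
    pvHalts 6 n := by
  interval_cases n <;> revert hodd <;> (unfold pvHalts; decide)

theorem pvHalts_main {n : Int} (hdom : -2147483648 ≤ n ∧ n ≤ 2147483648)
    (hpre : ¬(n % 2 = 1 ∧ n < -1)) : pvHalts 99 n := by
  by_cases hodd : n % 2 = 1
  · by_cases h50 : 50 ≤ n
    · exact pvHalts_of_fixed (pvFix_big_odd h50 hodd) _
    · have hge : -1 ≤ n := by omega
      by_cases hne : n = -1
      · subst hne; exact pvHalts_of_fixed (by decide) _
      · exact pvHalts_mono (by omega) (pvHalts_odd_small (by omega) (by omega) hodd)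
  · by_cases h50 : 50 ≤ n
    · have h32 : pvHalts (26 + 6) n := pvHalts_even_big 26 n h50 (by norm_num; omega)
      exact pvHalts_mono (by omega) h32
    · exact pvHalts_of_fixed (pvStep_even_small (by omega) (by omega)) _

-- fold-max helper lemmas
theorem pvFmax_ge_init (v : Int → Int) : ∀ (l : List Int) (i : Int),
    i ≤ l.foldl (fun b n => max b (v n)) i := by
  intro l; induction l with
  | nil => intro i; simp
  | cons a l ih => intro i; exact le_trans (le_max_left _ _) (ih _)

theorem pvFmax_ge_elem (v : Int → Int) : ∀ (l : List Int) (i : Int) (n : Int), n ∈ l →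
    v n ≤ l.foldl (fun b n => max b (v n)) i := by
  intro l; induction l with
  | nil => intro i n h; simp at h
  | cons a l ih =>
    intro i n h
    rcases List.mem_cons.mp h with h | h
    · subst h; exact le_trans (le_max_right _ _) (pvFmax_ge_init v l _)
    · exact ih _ n h

theorem pvFmax_cases (v : Int → Int) : ∀ (l : List Int) (i : Int),
    l.foldl (fun b n => max b (v n)) i = i ∨ ∃ n ∈ l, l.foldl (fun b n => max b (v n)) i = v n := by
  intro l; induction l with
  | nil => intro i; left; rfl
  | cons a l ih =>
    intro i
    rcases ih (max i (v a)) with h | ⟨n, hn, h⟩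
    · simp only [List.foldl_cons]
      rcases max_cases i (v a) with ⟨he, _⟩ | ⟨he, _⟩
      · left; rw [h, he]
      · right; exact ⟨a, List.mem_cons_self, by rw [h, he]⟩
    · right; exact ⟨n, List.mem_cons_of_mem _ hn, h⟩

theorem pvFmax_shift (v : Int → Int) : ∀ (l : List Int) (i : Int),
    l.foldl (fun b n => max b (1 + v n)) (1 + i) = 1 + l.foldl (fun b n => max b (v n)) i := by
  intro l; induction l with
  | nil => intro i; rfl
  | cons a l ih =>
    intro i
    simp only [List.foldl_cons]
    rw [show max (1 + i) (1 + v a) = 1 + max i (v a) by omega, ih]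

theorem pvFmax_zero (v : Int → Int) : ∀ (l : List Int), (∀ n ∈ l, v n = 0) →
    l.foldl (fun b n => max b (v n)) 0 = 0 := by
  intro l; induction l with
  | nil => intro _; rfl
  | cons a l ih =>
    intro h
    simp only [List.foldl_cons, h a List.mem_cons_self, max_self]
    exact ih (fun n hn => h n (List.mem_cons_of_mem _ hn))

theorem pvStable_iff (arr : List Int) : arr = arr.map pvStep ↔ ∀ n ∈ arr, pvStep n = n := by
  induction arr with
  | nil => simp
  | cons a l ih =>
    simp only [List.map_cons, List.cons.injEq, List.mem_cons]
    constructor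
    · rintro ⟨ha, hl⟩ n hn
      rcases hn with rfl | hn
      · exact ha.symm
      · exact (ih.mp hl) n hn
    · intro h
      exact ⟨(h a (Or.inl rfl)).symm, ih.mpr fun n hn => h n (Or.inr hn)⟩

theorem pvCnt_fixed {n : Int} (h : pvStep n = n) : ∀ f, pvCnt f n = 0 := by
  intro f; cases f with
  | zero => rfl
  | succ f => simp [pvCnt, h]

theorem pvCnt_nonneg : ∀ (f : Nat) (n : Int), 0 ≤ pvCnt f n := by
  intro f; induction f with
  | zero => intro n; simp [pvCnt]
  | succ f ih =>
    intro n; simp only [pvCnt]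
    split
    · simp
    · have := ih (pvStep n); omega

-- main loop lemma: with sufficient fuel A's round count is B's fold of per-element counts
theorem pvMain : ∀ (f : Nat) (arr : List Int) (x : Int),
    (∀ n ∈ arr, pvHalts f n) →
    pvLoopA (f + 1) arr x = x + arr.foldl (fun b n => max b (pvCnt (f + 1) n)) 0 := by
  intro f
  induction f with
  | zero =>
    intro arr x h
    have hst : arr = arr.map pvStep := (pvStable_iff arr).mpr (fun n hn => h n hn)
    simp only [pvLoopA]
    rw [if_pos hst, pvFmax_zero _ arr (fun n hn => pvCnt_fixed (show pvStep n = n from h n hn) 1)]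
    ring
  | succ f ih =>
    intro arr x h
    by_cases hst : arr = arr.map pvStep
    · have hfix : ∀ n ∈ arr, pvStep n = n := (pvStable_iff arr).mp hst
      simp only [pvLoopA]
      rw [if_pos hst, pvFmax_zero _ arr (fun n hn => pvCnt_fixed (hfix n hn) _)]
      ring
    · obtain ⟨n₀, hn₀, hn₀ne⟩ : ∃ n ∈ arr, pvStep n ≠ n := by
        by_contra hc
        push Not at hc
        exact hst ((pvStable_iff arr).mpr hc)
      have hrec : pvLoopA (f + 1 + 1) arr x = pvLoopA (f + 1) (arr.map pvStep) (x + 1) := by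
        simp only [pvLoopA]
        rw [if_neg hst]
      have hmem : ∀ m ∈ arr.map pvStep, pvHalts f m := by
        intro m hm
        obtain ⟨n, hn, rfl⟩ := List.mem_map.mp hm
        exact pvHalts_step.mpr (h n hn)
      rw [hrec, ih (arr.map pvStep) (x + 1) hmem, List.foldl_map]
      -- abbreviations
      set h' : Int → Int := fun n => pvCnt (f + 1) (pvStep n) with hh'
      have hgval : ∀ n : Int, pvCnt (f + 1 + 1) n = if pvStep n = n then 0 else 1 + h' n := by
        intro n; simp [pvCnt, hh']
      have hshift : arr.foldl (fun b n => max b (1 + h' n)) 1 =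
          1 + arr.foldl (fun b n => max b (h' n)) 0 := by
        have := pvFmax_shift h' arr 0
        simpa using this
      have hu_pos : ∀ n : Int, (1 : Int) ≤ 1 + h' n := by
        intro n; have := pvCnt_nonneg (f + 1) (pvStep n); simp [hh']; omega
      have hkey : arr.foldl (fun b n => max b (pvCnt (f + 1 + 1) n)) 0 =
          arr.foldl (fun b n => max b (1 + h' n)) 1 := by
        apply le_antisymm
        · rcases pvFmax_cases (fun n => pvCnt (f + 1 + 1) n) arr 0 with hc | ⟨n, hn, hc⟩
          · rw [hc]
            exact le_trans (by norm_num) (pvFmax_ge_init (fun n => 1 + h' n) arr 1)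
          · rw [hc, hgval n]
            split
            · have := pvFmax_ge_init (fun n => 1 + h' n) arr 1; omega
            · exact pvFmax_ge_elem (fun n => 1 + h' n) arr 1 n hn
        · rcases pvFmax_cases (fun n => 1 + h' n) arr 1 with hc | ⟨n, hn, hc⟩
          · rw [hc]
            have h1 : pvCnt (f + 1 + 1) n₀ ≤ arr.foldl (fun b n => max b (pvCnt (f + 1 + 1) n)) 0 :=
              pvFmax_ge_elem (fun n => pvCnt (f + 1 + 1) n) arr 0 n₀ hn₀
            rw [hgval n₀, if_neg hn₀ne] at h1
            have := hu_pos n₀; omega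
          · rw [hc]
            by_cases hfx : pvStep n = n
            · have hval : h' n = 0 := by
                simp only [hh', hfx]; exact pvCnt_fixed hfx (f + 1)
              have h1 : pvCnt (f + 1 + 1) n₀ ≤ arr.foldl (fun b n => max b (pvCnt (f + 1 + 1) n)) 0 :=
                pvFmax_ge_elem (fun n => pvCnt (f + 1 + 1) n) arr 0 n₀ hn₀
              rw [hgval n₀, if_neg hn₀ne] at h1
              have := hu_pos n₀; omega
            · have h1 : pvCnt (f + 1 + 1) n ≤ arr.foldl (fun b n => max b (pvCnt (f + 1 + 1) n)) 0 :=
                pvFmax_ge_elem (fun n => pvCnt (f + 1 + 1) n) arr 0 n hn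
              rw [hgval n, if_neg hfx] at h1
              exact h1
      rw [hkey, hshift]
      ring

-- ===== VERDICT (by name: the statement is the Claim_ definition above) =====
theorem solution_spec : Claim_equal_solution := by
  intro arr hdom hpre
  unfold Spec_solution solution solution_alt
  have h99 : ∀ n ∈ arr, pvHalts 99 n := by
    intro n hn
    have hd : pvDomInt n = true := by
      have := (List.all_eq_true.mp hdom) n hn; exact this
    have hd' : -2147483648 ≤ n ∧ n ≤ 2147483648 := by
      simpa [pvDomInt] using hd
    exact pvHalts_main hd' (hpre n hn)
  have := pvMain 99 arr 0 h99
  simpa using this
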